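-- pv_equiv track=rewrite | github.com/EmadDeve20/cdef | cdef/string.py | strcspn
-- ===== SOURCE A (Python) =====
-- def strcspn(text_one: str, text_tow: str) -> int:
--     def valid(char: str):
--         if not(char in "!@#$%^&*()_-+=<>,./\\[]{}'\";:`~"):
--             return True
--         else:
--             return False
--
--     result = 0
--     for i in text_one:
--         find = False
--         for j in text_tow:
--             if valid(i) and i == j:
--                 find = True
--                 break
--         if not find:
--             result += 1
--     return result
-- ===== SOURCE B (Python) =====
-- _SPECIAL = "!@#$%^&*()_-+=<>,./\\[]{}'\";:`~"
--
-- def strcspn(text_one: str, text_tow: str) -> int: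
--     # Complement strategy: tabulate text_one once, then subtract the
--     # occurrences of the non-special characters present in text_tow.
--     allowed = set(text_tow) - set(_SPECIAL)
--     counts = {}
--     for c in text_one:
--         counts[c] = counts.get(c, 0) + 1
--     return len(text_one) - sum(counts.get(c, 0) for c in allowed)
-- ===== Notes on version B (the rewrite author's own statement) =====
-- stated objective: faster
-- what changed: Replaces A's per-character scan of text_tow (with substring membership test per char) by a complement computation: build a dict counter of text_one once and subtract the summed counts of the allowed alphabet set(text_tow) - specials from len(text_one).
import Mathlib
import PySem

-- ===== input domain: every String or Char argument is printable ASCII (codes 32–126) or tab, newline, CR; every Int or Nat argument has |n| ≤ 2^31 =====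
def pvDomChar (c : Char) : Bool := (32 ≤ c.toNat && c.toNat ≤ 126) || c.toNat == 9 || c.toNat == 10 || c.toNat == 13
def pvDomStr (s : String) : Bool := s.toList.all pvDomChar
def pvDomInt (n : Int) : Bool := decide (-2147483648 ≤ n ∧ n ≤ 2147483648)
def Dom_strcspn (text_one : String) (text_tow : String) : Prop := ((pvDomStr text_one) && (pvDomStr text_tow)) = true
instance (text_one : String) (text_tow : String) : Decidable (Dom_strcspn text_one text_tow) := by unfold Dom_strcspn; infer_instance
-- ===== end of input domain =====

-- B tabulates text_one once (a dict counter) and returns len(text_one) minus the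
-- occurrences of the allowed alphabet set(text_tow) - specials; same values as A, no speed claim proved.

-- the special-character string shared by both programs
def pvSpecial : List Char := "!@#$%^&*()_-+=<>,./\\[]{}'\";:`~".toList

-- ===== PORT A =====
-- 'char in "<specials>"' for the 1-char loop variable; exact via substring search
def pvValid (c : Char) : Bool := ! (PySem.Chars.isIn [c] pvSpecial)

-- the inner 'for j in text_tow: … break' loop, returning the final value of find
def pvFind (i : Char) : List Char → Bool
  | [] => false
  | j :: rest => if pvValid i && i == j then true else pvFind i rest

def strcspn (text_one : String) (text_tow : String) : Int :=
  text_one.toList.foldl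
    (fun result i => if ! pvFind i text_tow.toList then result + 1 else result) 0

-- ===== PORT B =====
def strcspn_alt (text_one : String) (text_tow : String) : Int :=
  let allowed : PySem.Set Char := PySem.Set.diff (PySem.Set.ofList text_tow.toList) pvSpecial
  let counts : PySem.Dict Char Int :=
    text_one.toList.foldl (fun d c => d.insert c (d.getD c 0 + 1)) PySem.Dict.empty
  PySem.Str.len text_one - (allowed.map (fun c => counts.getD c 0)).sum

-- ===== PRECONDITION & SPEC =====
def Spec_strcspn (text_one : String) (text_tow : String) (out : Int) : Prop := out = strcspn_alt text_one text_tow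
instance (text_one : String) (text_tow : String) (out : Int) : Decidable (Spec_strcspn text_one text_tow out) := by unfold Spec_strcspn; infer_instance

-- ===== CLAIM (what is proved, stated in full; the proofs are below) =====
def Claim_equal_strcspn : Prop := ∀ (text_one : String) (text_tow : String), Dom_strcspn text_one text_tow → Spec_strcspn text_one text_tow (strcspn text_one text_tow)

-- ===== LEMMAS AND PROOFS =====

-- the inner loop finds a match iff the char is valid and occurs in text_tow
theorem pvFind_eq (i : Char) (l : List Char) :
    pvFind i l = (pvValid i && l.contains i) := by
  induction l with
  | nil => simp [pvFind]
  | cons j rest ih =>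
    simp only [pvFind, ih, List.contains_cons]
    by_cases h : pvValid i = true
    · by_cases hj : i = j <;> simp_all
    · simp [h]

-- a nodup list's 0/1 indicator sum is a membership test
theorem sum_indicator_nodup {α : Type} [DecidableEq α] (S : List α) (c : α) (h : S.Nodup) :
    (S.map (fun a => if a = c then (1 : Int) else 0)).sum = if c ∈ S then 1 else 0 := by
  induction S with
  | nil => simp
  | cons a S ih =>
    simp only [List.nodup_cons] at h
    by_cases hac : a = c
    · subst hac
      simp [ih h.2, h.1]
    · simp only [List.map_cons, List.sum_cons, if_neg hac, zero_add, ih h.2, List.mem_cons]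
      have : ¬ c = a := fun hh => hac hh.symm
      simp [this]

-- over a nodup alphabet, summed per-letter counts equal a countP of membership
theorem sum_counts_eq_countP {α : Type} [DecidableEq α] (S : List α) (xs : List α) (h : S.Nodup) :
    (S.map (fun a => (xs.count a : Int))).sum = (xs.countP (fun x => decide (x ∈ S)) : Int) := by
  induction xs with
  | nil => simp
  | cons c xs ih =>
    rw [List.countP_cons]
    have hsplit : (S.map (fun a => ((c :: xs).count a : Int))).sum
        = (S.map (fun a => (xs.count a : Int))).sum
          + (S.map (fun a => if a = c then (1 : Int) else 0)).sum := by
      rw [← List.sum_map_add]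
      apply congrArg
      apply List.map_congr_left
      intro a _
      rw [List.count_cons]
      by_cases hac : a = c
      · subst hac; simp
      · have hne : (c == a) = false := beq_eq_false_iff_ne.mpr (Ne.symm hac)
        simp [hne, hac]
    rw [hsplit, ih, sum_indicator_nodup S c h]
    by_cases hc : c ∈ S <;> simp [hc]

-- 'char in specials' for a single char is list membership
theorem pvValid_eq (c : Char) : pvValid c = ! (pvSpecial.contains c) := by
  have : PySem.Chars.isIn [c] pvSpecial = pvSpecial.contains c := by
    rw [Bool.eq_iff_iff, PySem.Chars.isIn_iff_infix, List.contains_iff_mem,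
      List.singleton_infix_iff]
  rw [pvValid, this]

-- B's let-bound body, spelled out
theorem strcspn_alt_eq (o t : String) : strcspn_alt o t =
    PySem.Str.len o - ((PySem.Set.diff (PySem.Set.ofList t.toList) pvSpecial).map
      (fun c => (o.toList.foldl (fun d c => d.insert c (d.getD c 0 + 1)) PySem.Dict.empty).getD c 0)).sum := rfl

-- ===== VERDICT (by name: the statement is the Claim_ definition above) =====
theorem strcspn_spec : Claim_equal_strcspn := by
  intro text_one text_tow _
  unfold Spec_strcspn strcspn
  rw [strcspn_alt_eq]
  set one := text_one.toList with hone
  set tow := text_tow.toList with htow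
  set allowed : PySem.Set Char := PySem.Set.diff (PySem.Set.ofList tow) pvSpecial with hallowed
  -- A is a countP
  rw [PySem.List.foldl_if_add_one (fun i => ! pvFind i tow), zero_add]
  -- B's counter reads off counts
  have hcounts : ∀ c : Char,
      (one.foldl (fun d c => d.insert c (d.getD c 0 + 1)) PySem.Dict.empty).getD c 0
        = (one.count c : Int) := by
    intro c
    rw [PySem.Dict.getD_foldl_insert_add_one]
    simp [PySem.Dict.empty, PySem.Dict.getD, PySem.Dict.get?]
  have hnodup : allowed.Nodup := PySem.Set.nodup_diff _ _ (PySem.Set.nodup_ofList tow)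
  have hsum : ((allowed).map
      (fun c => (one.foldl (fun d c => d.insert c (d.getD c 0 + 1)) PySem.Dict.empty).getD c 0)).sum
      = (one.countP (fun x => decide (x ∈ allowed)) : Int) := by
    rw [List.map_congr_left (fun a _ => hcounts a)]
    exact sum_counts_eq_countP allowed one hnodup
  rw [hsum, PySem.Str.len_eq, ← hone]
  -- membership in allowed vs the A-side predicate
  have hpred : ∀ x : Char, (! pvFind x tow) = ! decide (x ∈ allowed) := by
    intro x
    rw [pvFind_eq, pvValid_eq]
    have hmem : x ∈ allowed ↔ x ∈ tow ∧ x ∉ pvSpecial := by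
      rw [hallowed, PySem.Set.mem_diff, PySem.Set.mem_ofList]
    by_cases h1 : x ∈ tow <;> by_cases h2 : x ∈ pvSpecial <;>
      simp [hmem, h1, h2]
  rw [List.countP_congr (fun x _ => by rw [hpred x])]
  have h1 := one.length_eq_countP_add_countP (fun x => decide (x ∈ allowed))
  have h2 : one.countP (fun a => decide ¬ (decide (a ∈ allowed) = true))
      = one.countP (fun x => ! decide (x ∈ allowed)) :=
    List.countP_congr (by intro x _; simp)
  omega
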